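-- pv_equiv track=rewrite | github.com/celinecollin/nutraceuticals | _scripts/synchronize_png_assets.py | standardize_units
-- ===== SOURCE A (Python) =====
-- def standardize_units(label):
--     """Standardize currency/quantity abbreviations: $B→bn, $M→m, Millions→m."""
--     if not isinstance(label, str):
--         return label
--     replacements = [
--         ('($B)', '(bn)'), ('$B', 'bn'), ('Billions', 'bn'),
--         ('($M)', '(m)'), ('$M', 'm'),
--         ('(Millions)', '(m)'), ('Millions', 'm'),
--         ('Million Tonnes', 'm tonnes'), ('Million', 'm')
--     ]
--     result = label
--     for old, new in replacements:
--         result = result.replace(old, new)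
--     return result
-- ===== SOURCE B (Python) =====
-- def standardize_units(label):
--     """Standardize currency/quantity abbreviations in ONE left-to-right scan,
--     trying the rules in priority order at each position (instead of nine
--     sequential full-string replace passes)."""
--     if not isinstance(label, str):
--         return label
--     rules = [
--         ('($B)', '(bn)'), ('$B', 'bn'), ('Billions', 'bn'),
--         ('($M)', '(m)'), ('$M', 'm'),
--         ('(Millions)', '(m)'), ('Millions', 'm'),
--         ('Million Tonnes', 'm tonnes'), ('Million', 'm')
--     ]
--     out = []
--     i = 0
--     n = len(label)
--     while i < n:
--         for old, new in rules:
--             if label.startswith(old, i):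
--                 out.append(new)
--                 i += len(old)
--                 break
--         else:
--             out.append(label[i])
--             i += 1
--     return ''.join(out)
-- ===== Notes on version B (the rewrite author's own statement) =====
-- stated objective: alternative
-- what changed: B replaces A's nine sequential full-string str.replace passes by a single left-to-right scan that, at each position, tries the same replacement rules in the same priority order, emits the replacement and jumps over the match (or copies the character).
import Mathlib
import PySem

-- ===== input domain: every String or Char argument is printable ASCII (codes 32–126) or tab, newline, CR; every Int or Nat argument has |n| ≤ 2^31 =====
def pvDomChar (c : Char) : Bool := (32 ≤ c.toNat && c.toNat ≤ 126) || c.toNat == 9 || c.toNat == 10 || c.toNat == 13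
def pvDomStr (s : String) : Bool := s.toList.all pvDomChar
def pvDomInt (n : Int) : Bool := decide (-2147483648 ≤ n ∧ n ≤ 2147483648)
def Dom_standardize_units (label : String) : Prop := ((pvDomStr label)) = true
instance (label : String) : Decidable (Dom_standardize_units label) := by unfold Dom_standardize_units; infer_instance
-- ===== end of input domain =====

-- B replaces A's nine sequential full-string replace passes by ONE left-to-right scan
-- that tries the same rules in the same priority order at each position (objective: alternative).

-- ===== PORT A =====
-- the literal replacement table of A, in A's order
def pvReplacements : List (String × String) :=
  [("($B)", "(bn)"), ("$B", "bn"), ("Billions", "bn"),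
   ("($M)", "(m)"), ("$M", "m"),
   ("(Millions)", "(m)"), ("Millions", "m"),
   ("Million Tonnes", "m tonnes"), ("Million", "m")]

-- A: result = label; for old, new in replacements: result = result.replace(old, new)
-- (the isinstance guard vanishes: label is a String here)
def standardize_units (label : String) : String :=
  pvReplacements.foldl (fun result p => PySem.Str.replace result p.1 p.2) label

-- ===== PORT B =====
-- B's rules as character lists (same pairs, same order)
def pvP1 : List Char := ['(', '$', 'B', ')']
def pvN1 : List Char := ['(', 'b', 'n', ')']
def pvP2 : List Char := ['$', 'B']
def pvN2 : List Char := ['b', 'n']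
def pvP3 : List Char := ['B', 'i', 'l', 'l', 'i', 'o', 'n', 's']
def pvN3 : List Char := ['b', 'n']
def pvP4 : List Char := ['(', '$', 'M', ')']
def pvN4 : List Char := ['(', 'm', ')']
def pvP5 : List Char := ['$', 'M']
def pvN5 : List Char := ['m']
def pvP6 : List Char := ['(', 'M', 'i', 'l', 'l', 'i', 'o', 'n', 's', ')']
def pvN6 : List Char := ['(', 'm', ')']
def pvP7 : List Char := ['M', 'i', 'l', 'l', 'i', 'o', 'n', 's']
def pvN7 : List Char := ['m']
def pvP8 : List Char := ['M', 'i', 'l', 'l', 'i', 'o', 'n', ' ', 'T', 'o', 'n', 'n', 'e', 's']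
def pvN8 : List Char := ['m', ' ', 't', 'o', 'n', 'n', 'e', 's']
def pvP9 : List Char := ['M', 'i', 'l', 'l', 'i', 'o', 'n']
def pvN9 : List Char := ['m']

-- B's while-loop: at each position try the rules in order; on a match emit the
-- replacement and jump over the matched text, otherwise emit the character.
def pvScan : List Char → List Char
  | [] => []
  | c :: t =>
    if pvP1 <+: (c :: t) then pvN1 ++ pvScan ((c :: t).drop pvP1.length)
    else if pvP2 <+: (c :: t) then pvN2 ++ pvScan ((c :: t).drop pvP2.length)
    else if pvP3 <+: (c :: t) then pvN3 ++ pvScan ((c :: t).drop pvP3.length)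
    else if pvP4 <+: (c :: t) then pvN4 ++ pvScan ((c :: t).drop pvP4.length)
    else if pvP5 <+: (c :: t) then pvN5 ++ pvScan ((c :: t).drop pvP5.length)
    else if pvP6 <+: (c :: t) then pvN6 ++ pvScan ((c :: t).drop pvP6.length)
    else if pvP7 <+: (c :: t) then pvN7 ++ pvScan ((c :: t).drop pvP7.length)
    else if pvP8 <+: (c :: t) then pvN8 ++ pvScan ((c :: t).drop pvP8.length)
    else if pvP9 <+: (c :: t) then pvN9 ++ pvScan ((c :: t).drop pvP9.length)
    else c :: pvScan t
  termination_by l => l.length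
  decreasing_by all_goals simp [pvP1, pvP2, pvP3, pvP4, pvP5, pvP6, pvP7, pvP8, pvP9]

def standardize_units_alt (label : String) : String :=
  String.ofList (pvScan label.toList)

-- ===== PRECONDITION & SPEC =====
def Spec_standardize_units (label : String) (out : String) : Prop := out = standardize_units_alt label
instance (label : String) (out : String) : Decidable (Spec_standardize_units label out) := by unfold Spec_standardize_units; infer_instance

-- ===== CLAIM (what is proved, stated in full; the proofs are below) =====
def Claim_equal_standardize_units : Prop := ∀ (label : String), Dom_standardize_units label → Spec_standardize_units label (standardize_units label)

-- ===== LEMMAS AND PROOFS =====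

theorem pv_go_zero (old new l acc : List Char) :
    PySem.Chars.replace.go old new 0 l acc = acc.reverse ++ l := rfl

theorem pv_go_succ_nil (old new acc : List Char) (f : Nat) :
    PySem.Chars.replace.go old new (f+1) [] acc = acc.reverse := rfl

theorem pv_go_succ_cons (old new t acc : List Char) (c : Char) (f : Nat) :
    PySem.Chars.replace.go old new (f+1) (c::t) acc =
      if old.isPrefixOf (c::t) then PySem.Chars.replace.go old new f ((c::t).drop old.length) (new.reverse ++ acc)
      else PySem.Chars.replace.go old new f t (c::acc) := rfl

theorem pv_go_acc (old new : List Char) : ∀ (f : Nat) (l acc : List Char),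
    PySem.Chars.replace.go old new f l acc = acc.reverse ++ PySem.Chars.replace.go old new f l [] := by
  intro f
  induction f with
  | zero => intro l acc; rw [pv_go_zero, pv_go_zero]; simp
  | succ f ih =>
    intro l acc
    cases l with
    | nil => rw [pv_go_succ_nil, pv_go_succ_nil]; simp
    | cons c t =>
      rw [pv_go_succ_cons, pv_go_succ_cons]
      by_cases h : old.isPrefixOf (c::t)
      · rw [if_pos h, if_pos h, ih _ (new.reverse ++ acc), ih _ (new.reverse ++ [])]
        simp
      · rw [if_neg h, if_neg h, ih _ (c :: acc), ih _ [c]]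
        simp

theorem pv_go_fuel (old new : List Char) (hold : old ≠ []) : ∀ (f₁ : Nat) (f₂ : Nat) (l acc : List Char),
    l.length ≤ f₁ → l.length ≤ f₂ →
    PySem.Chars.replace.go old new f₁ l acc = PySem.Chars.replace.go old new f₂ l acc := by
  have holdlen : 1 ≤ old.length := by
    cases old with
    | nil => simp at hold
    | cons o otl => simp
  intro f₁
  induction f₁ with
  | zero =>
    intro f₂ l acc h1 h2
    cases l with
    | nil =>
      cases f₂ with
      | zero => rfl
      | succ f₂ => rw [pv_go_zero, pv_go_succ_nil]; simp
    | cons c t => simp at h1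
  | succ f ih =>
    intro f₂ l acc h1 h2
    cases l with
    | nil =>
      cases f₂ with
      | zero => rw [pv_go_zero, pv_go_succ_nil]; simp
      | succ f₂ => rfl
    | cons c t =>
      cases f₂ with
      | zero => simp at h2
      | succ f₂ =>
        rw [pv_go_succ_cons, pv_go_succ_cons]
        by_cases h : old.isPrefixOf (c::t)
        · rw [if_pos h, if_pos h]
          apply ih
          · simp at h1 ⊢; omega
          · simp at h2 ⊢; omega
        · rw [if_neg h, if_neg h]
          apply ih <;> simp at h1 h2 ⊢ <;> omega

theorem pv_old_isEmpty (o : Char) (otl : List Char) : (o :: otl).isEmpty = false := rfl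

theorem pv_replace_nil (old new : List Char) (hold : old ≠ []) :
    PySem.Chars.replace [] old new = [] := by
  obtain ⟨o, otl, rfl⟩ := List.exists_cons_of_ne_nil hold
  simp only [PySem.Chars.replace, pv_old_isEmpty, Bool.false_eq_true, if_false]
  rw [show ([] : List Char).length = 0 from rfl, pv_go_zero]
  rfl

theorem pv_replace_cons (old new : List Char) (c : Char) (t : List Char) (hold : old ≠ [])
    (h : ¬ old <+: (c :: t)) :
    PySem.Chars.replace (c :: t) old new = c :: PySem.Chars.replace t old new := by
  obtain ⟨o, otl, rfl⟩ := List.exists_cons_of_ne_nil hold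
  have hbp : (o :: otl).isPrefixOf (c :: t) = false := by
    rw [Bool.eq_false_iff]; intro hb; exact h (List.isPrefixOf_iff_prefix.mp hb)
  simp only [PySem.Chars.replace, pv_old_isEmpty, Bool.false_eq_true, if_false]
  rw [show (c :: t).length = t.length + 1 by simp, pv_go_succ_cons, hbp]
  simp only [Bool.false_eq_true, if_false]
  rw [pv_go_acc]
  rfl

theorem pv_replace_prefix (old new u : List Char) (hold : old ≠ []) :
    PySem.Chars.replace (old ++ u) old new = new ++ PySem.Chars.replace u old new := by
  obtain ⟨o, otl, rfl⟩ := List.exists_cons_of_ne_nil hold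
  simp only [PySem.Chars.replace, pv_old_isEmpty, Bool.false_eq_true, if_false]
  have hlen : ((o :: otl) ++ u).length = (otl.length + u.length) + 1 := by simp only [List.length_append, List.length_cons]; omega
  have hcons : (o :: otl) ++ u = o :: (otl ++ u) := by simp
  rw [hlen, hcons, pv_go_succ_cons]
  rw [if_pos (by rw [← hcons]; exact List.isPrefixOf_iff_prefix.mpr (List.prefix_append _ _))]
  rw [show (o :: (otl ++ u)).drop (o :: otl).length = u by simp]
  rw [pv_go_fuel (o::otl) new hold _ u.length u _ (by omega) (by omega)]
  rw [pv_go_acc]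
  simp

-- prefix of an append, both directions excluded
theorem pv_not_prefix_append (a s v : List Char) (h1 : ¬ a <+: s) (h2 : ¬ s <+: a) :
    ¬ a <+: s ++ v := by
  intro h
  rcases le_or_gt a.length s.length with hle | hgt
  · exact h1 (List.prefix_of_prefix_length_le h (List.prefix_append _ _) hle)
  · exact h2 (List.prefix_of_prefix_length_le (List.prefix_append _ _) h (by omega))

-- replace commutes with an untouchable front (condition may mention the tail v)
theorem pv_replace_front (old new : List Char) (hold : old ≠ []) :
    ∀ (front v : List Char),
    (∀ j, j < front.length → ¬ old <+: (front.drop j ++ v)) →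
    PySem.Chars.replace (front ++ v) old new = front ++ PySem.Chars.replace v old new := by
  intro front
  induction front with
  | nil => intro v h; simp
  | cons c f ih =>
    intro v h
    rw [List.cons_append, pv_replace_cons old new c (f ++ v) hold (by simpa using h 0 (by simp)),
      ih v (by intro j hj; simpa using h (j+1) (by simpa using hj))]
    simp

-- decidable-side-condition version
theorem pv_replace_front_dec (old new : List Char) (hold : old ≠ []) (front v : List Char)
    (h : ∀ j, j < front.length → ¬ old <+: front.drop j ∧ ¬ front.drop j <+: old) :
    PySem.Chars.replace (front ++ v) old new = front ++ PySem.Chars.replace v old new := by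
  refine pv_replace_front old new hold front v (fun j hj => ?_)
  exact pv_not_prefix_append _ _ _ (h j hj).1 (h j hj).2

-- a prefix of the output whose characters avoid new's first character was already a prefix
theorem pv_prefix_replace (old new : List Char) (hold : old ≠ []) (hnew : new ≠ []) :
    ∀ (s P : List Char), (∀ d ∈ new.take 1, d ∉ P) →
    P <+: PySem.Chars.replace s old new → P <+: s := by
  intro s
  induction s with
  | nil =>
    intro P _ h
    rwa [pv_replace_nil old new hold] at h
  | cons c t ih =>
    intro P hc h
    by_cases hp : old <+: (c :: t)
    · obtain ⟨u, hu⟩ := hp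
      rw [← hu, pv_replace_prefix old new u hold] at h
      cases P with
      | nil => exact List.nil_prefix
      | cons p P' =>
        obtain ⟨n0, ntl, rfl⟩ := List.exists_cons_of_ne_nil hnew
        rw [List.cons_append, List.cons_prefix_cons] at h
        exact absurd (h.1 ▸ List.mem_cons_self) (hc n0 (by simp))
    · rw [pv_replace_cons old new c t hold hp] at h
      cases P with
      | nil => exact List.nil_prefix
      | cons p P' =>
        rw [List.cons_prefix_cons] at h
        have := ih P' (fun d hd hmem => hc d hd (List.mem_cons_of_mem _ hmem)) h.2
        rw [List.cons_prefix_cons]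
        exact ⟨h.1, this⟩

-- the sequential-replace chain of A, over char lists
def pvRunC (rules : List (List Char × List Char)) (s : List Char) : List Char :=
  rules.foldl (fun s r => PySem.Chars.replace s r.1 r.2) s

theorem pvRunC_nil_rules (s : List Char) : pvRunC [] s = s := rfl

theorem pvRunC_cons_rules (r : List Char × List Char) (rs : List (List Char × List Char)) (s : List Char) :
    pvRunC (r :: rs) s = pvRunC rs (PySem.Chars.replace s r.1 r.2) := rfl

theorem pvRunC_append (a b : List (List Char × List Char)) (s : List Char) :
    pvRunC (a ++ b) s = pvRunC b (pvRunC a s) := by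
  simp [pvRunC, List.foldl_append]

-- Bool-valued side conditions (kernel-evaluable on the literal rule lists)
def pvFrontOK (rules : List (List Char × List Char)) (front : List Char) : Bool :=
  rules.all fun r => !r.1.isEmpty &&
    ((List.range front.length).all fun j =>
      !(r.1.isPrefixOf (front.drop j)) && !((front.drop j).isPrefixOf r.1))

def pvPresOK (rules : List (List Char × List Char)) (P : List Char) : Bool :=
  rules.all fun r => !r.1.isEmpty && !r.2.isEmpty && ((r.2.take 1).all fun d => !(P.contains d))

theorem pv_ne_nil_of_not_isEmpty (l : List Char) (h : (!l.isEmpty) = true) : l ≠ [] := by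
  simp at h
  exact h

-- chain commutes with an untouchable front, checkable side conditions
theorem pvRunC_front (rules : List (List Char × List Char)) :
    ∀ (front v : List Char), pvFrontOK rules front = true →
    pvRunC rules (front ++ v) = front ++ pvRunC rules v := by
  induction rules with
  | nil => intro front v _; rfl
  | cons r rs ih =>
    intro front v h
    rw [pvFrontOK, List.all_cons, Bool.and_eq_true] at h
    obtain ⟨hr, hrs⟩ := h
    rw [Bool.and_eq_true] at hr
    have hne : r.1 ≠ [] := pv_ne_nil_of_not_isEmpty _ hr.1
    have hjs : ∀ j, j < front.length → ¬ r.1 <+: front.drop j ∧ ¬ front.drop j <+: r.1 := by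
      intro j hj
      have := List.all_eq_true.mp hr.2 j (List.mem_range.mpr hj)
      rw [Bool.and_eq_true] at this
      constructor
      · intro hp; have := this.1; rw [List.isPrefixOf_iff_prefix.mpr hp] at this; simp at this
      · intro hp; have := this.2; rw [List.isPrefixOf_iff_prefix.mpr hp] at this; simp at this
    rw [pvRunC_cons_rules, pvRunC_cons_rules,
      pv_replace_front_dec r.1 r.2 hne front v hjs,
      ih front _ hrs]

-- a prefix of the chain's output avoiding all the news' first characters was already a prefix
theorem pvRunC_pres (rules : List (List Char × List Char)) :
    ∀ (s P : List Char), pvPresOK rules P = true →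
    P <+: pvRunC rules s → P <+: s := by
  induction rules with
  | nil => intro s P _ h; exact h
  | cons r rs ih =>
    intro s P h hp
    rw [pvPresOK, List.all_cons, Bool.and_eq_true] at h
    obtain ⟨hr, hrs⟩ := h
    rw [Bool.and_eq_true, Bool.and_eq_true] at hr
    obtain ⟨⟨h1, h2⟩, h3⟩ := hr
    rw [pvRunC_cons_rules] at hp
    have hc : ∀ d ∈ r.2.take 1, d ∉ P := by
      intro d hd hmem
      have hb := List.all_eq_true.mp h3 d hd
      simp at hb
      exact hb hmem
    exact pv_prefix_replace r.1 r.2 (pv_ne_nil_of_not_isEmpty _ h1) (pv_ne_nil_of_not_isEmpty _ h2)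
      s P hc (ih _ P hrs hp)

-- a rule whose old does not newly match at a kept head character
theorem pv_not_prefix_cons_run (P : List Char) (rules : List (List Char × List Char)) (c : Char) (t : List Char)
    (hPne : P ≠ [])
    (hconds : pvPresOK rules (P.drop 1) = true)
    (hP : ¬ P <+: c :: t) :
    ¬ P <+: c :: pvRunC rules t := by
  intro hp
  obtain ⟨p0, q, rfl⟩ := List.exists_cons_of_ne_nil hPne
  rw [List.cons_prefix_cons] at hp
  have hq : q <+: t := pvRunC_pres rules t q hconds hp.2
  exact hP (by rw [List.cons_prefix_cons]; exact ⟨hp.1, hq⟩)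

theorem pvRunC_cons_rules' (p q : List Char) (rs : List (List Char × List Char)) (s : List Char) :
    pvRunC ((p, q) :: rs) s = pvRunC rs (PySem.Chars.replace s p q) := rfl

-- one matched rule in the middle of the chain
theorem pv_case (PRE POST : List (List Char × List Char)) (p q u : List Char)
    (hp : p ≠ [])
    (hPRE : pvFrontOK PRE p = true)
    (hPOST : pvFrontOK POST q = true) :
    pvRunC (PRE ++ (p, q) :: POST) (p ++ u) = q ++ pvRunC (PRE ++ (p, q) :: POST) u := by
  calc pvRunC (PRE ++ (p, q) :: POST) (p ++ u)
      = pvRunC POST (PySem.Chars.replace (p ++ pvRunC PRE u) p q) := by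
        rw [pvRunC_append, pvRunC_front PRE p u hPRE, pvRunC_cons_rules']
    _ = q ++ pvRunC POST (PySem.Chars.replace (pvRunC PRE u) p q) := by
        rw [pv_replace_prefix p q _ hp, pvRunC_front POST q _ hPOST]
    _ = q ++ pvRunC (PRE ++ (p, q) :: POST) u := by
        rw [pvRunC_append, pvRunC_cons_rules']

theorem pv_strip (p a b : List Char) (h : p ++ a <+: p ++ b) : a <+: b :=
  (List.prefix_append_right_inj p).mp h

theorem pv_graft (p a b : List Char) (h : a <+: b) : p ++ a <+: p ++ b :=
  (List.prefix_append_right_inj p).mpr h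


-- ===== bridge: port A over char lists =====
def pvRULESC : List (List Char × List Char) := [(pvP1, pvN1), (pvP2, pvN2), (pvP3, pvN3), (pvP4, pvN4), (pvP5, pvN5), (pvP6, pvN6), (pvP7, pvN7), (pvP8, pvN8), (pvP9, pvN9)]

theorem pv_bridgeA (label : String) :
    (standardize_units label).toList = pvRunC pvRULESC label.toList := by
  simp only [standardize_units, pvReplacements, List.foldl, PySem.Str.toList_replace,
    pvRunC, pvRULESC]
  rfl

theorem pv_head_mismatch (a b v : List Char) (x y : Char) (hxy : x ≠ y) : ¬ (x :: a) <+: (y :: b) ++ v := by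
  rw [List.cons_append, List.cons_prefix_cons]
  rintro ⟨h, -⟩
  exact hxy h

set_option maxRecDepth 8192 in
theorem pv_mainN : ∀ (n : Nat) (l : List Char), l.length ≤ n → pvRunC pvRULESC l = pvScan l := by
  intro n
  induction n with
  | zero =>
    intro l hl
    have hnil : l = [] := by cases l with | nil => rfl | cons c t => simp at hl
    subst hnil
    rw [show pvScan [] = [] from by rw [pvScan]]
    decide
  | succ n ih =>
    intro l hln
    cases l with
    | nil =>
      rw [show pvScan [] = [] from by rw [pvScan]]
      decide
    | cons c t =>
      by_cases h1 : pvP1 <+: c :: t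
      · obtain ⟨u, hu⟩ := h1
        have hul : u.length ≤ n := by
          have hlu := congrArg List.length hu
          simp [pvP1] at hlu
          simp only [List.length_cons] at hln
          omega
        have hk' : pvP1 <+: c :: t := ⟨u, hu⟩
        have hA : pvRunC pvRULESC (c :: t) = pvN1 ++ pvRunC pvRULESC u := by
          rw [← hu, show pvRULESC = [] ++ ((pvP1, pvN1) :: [(pvP2, pvN2), (pvP3, pvN3), (pvP4, pvN4), (pvP5, pvN5), (pvP6, pvN6), (pvP7, pvN7), (pvP8, pvN8), (pvP9, pvN9)]) from rfl]
          exact pv_case [] [(pvP2, pvN2), (pvP3, pvN3), (pvP4, pvN4), (pvP5, pvN5), (pvP6, pvN6), (pvP7, pvN7), (pvP8, pvN8), (pvP9, pvN9)] pvP1 pvN1 u (by decide) (by decide) (by decide)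
        have hB : pvScan (c :: t) = pvN1 ++ pvScan u := by
          rw [pvScan, if_pos hk']
          rw [← hu, List.drop_left]
        rw [hA, hB, ih u hul]
      by_cases h2 : pvP2 <+: c :: t
      · obtain ⟨u, hu⟩ := h2
        have hul : u.length ≤ n := by
          have hlu := congrArg List.length hu
          simp [pvP2] at hlu
          simp only [List.length_cons] at hln
          omega
        have hk' : pvP2 <+: c :: t := ⟨u, hu⟩
        have hA : pvRunC pvRULESC (c :: t) = pvN2 ++ pvRunC pvRULESC u := by
          rw [← hu, show pvRULESC = [(pvP1, pvN1)] ++ ((pvP2, pvN2) :: [(pvP3, pvN3), (pvP4, pvN4), (pvP5, pvN5), (pvP6, pvN6), (pvP7, pvN7), (pvP8, pvN8), (pvP9, pvN9)]) from rfl]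
          exact pv_case [(pvP1, pvN1)] [(pvP3, pvN3), (pvP4, pvN4), (pvP5, pvN5), (pvP6, pvN6), (pvP7, pvN7), (pvP8, pvN8), (pvP9, pvN9)] pvP2 pvN2 u (by decide) (by decide) (by decide)
        have hB : pvScan (c :: t) = pvN2 ++ pvScan u := by
          rw [pvScan, if_neg h1, if_pos hk']
          rw [← hu, List.drop_left]
        rw [hA, hB, ih u hul]
      by_cases h3 : pvP3 <+: c :: t
      · obtain ⟨u, hu⟩ := h3
        have hul : u.length ≤ n := by
          have hlu := congrArg List.length hu
          simp [pvP3] at hlu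
          simp only [List.length_cons] at hln
          omega
        have hk' : pvP3 <+: c :: t := ⟨u, hu⟩
        have hA : pvRunC pvRULESC (c :: t) = pvN3 ++ pvRunC pvRULESC u := by
          rw [← hu, show pvRULESC = [(pvP1, pvN1), (pvP2, pvN2)] ++ ((pvP3, pvN3) :: [(pvP4, pvN4), (pvP5, pvN5), (pvP6, pvN6), (pvP7, pvN7), (pvP8, pvN8), (pvP9, pvN9)]) from rfl]
          exact pv_case [(pvP1, pvN1), (pvP2, pvN2)] [(pvP4, pvN4), (pvP5, pvN5), (pvP6, pvN6), (pvP7, pvN7), (pvP8, pvN8), (pvP9, pvN9)] pvP3 pvN3 u (by decide) (by decide) (by decide)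
        have hB : pvScan (c :: t) = pvN3 ++ pvScan u := by
          rw [pvScan, if_neg h1, if_neg h2, if_pos hk']
          rw [← hu, List.drop_left]
        rw [hA, hB, ih u hul]
      by_cases h4 : pvP4 <+: c :: t
      · obtain ⟨u, hu⟩ := h4
        have hul : u.length ≤ n := by
          have hlu := congrArg List.length hu
          simp [pvP4] at hlu
          simp only [List.length_cons] at hln
          omega
        have hk' : pvP4 <+: c :: t := ⟨u, hu⟩
        have hA : pvRunC pvRULESC (c :: t) = pvN4 ++ pvRunC pvRULESC u := by
          rw [← hu, show pvRULESC = [(pvP1, pvN1), (pvP2, pvN2), (pvP3, pvN3)] ++ ((pvP4, pvN4) :: [(pvP5, pvN5), (pvP6, pvN6), (pvP7, pvN7), (pvP8, pvN8), (pvP9, pvN9)]) from rfl]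
          exact pv_case [(pvP1, pvN1), (pvP2, pvN2), (pvP3, pvN3)] [(pvP5, pvN5), (pvP6, pvN6), (pvP7, pvN7), (pvP8, pvN8), (pvP9, pvN9)] pvP4 pvN4 u (by decide) (by decide) (by decide)
        have hB : pvScan (c :: t) = pvN4 ++ pvScan u := by
          rw [pvScan, if_neg h1, if_neg h2, if_neg h3, if_pos hk']
          rw [← hu, List.drop_left]
        rw [hA, hB, ih u hul]
      by_cases h5 : pvP5 <+: c :: t
      · obtain ⟨u, hu⟩ := h5
        have hul : u.length ≤ n := by
          have hlu := congrArg List.length hu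
          simp [pvP5] at hlu
          simp only [List.length_cons] at hln
          omega
        have hk' : pvP5 <+: c :: t := ⟨u, hu⟩
        have hA : pvRunC pvRULESC (c :: t) = pvN5 ++ pvRunC pvRULESC u := by
          rw [← hu, show pvRULESC = [(pvP1, pvN1), (pvP2, pvN2), (pvP3, pvN3), (pvP4, pvN4)] ++ ((pvP5, pvN5) :: [(pvP6, pvN6), (pvP7, pvN7), (pvP8, pvN8), (pvP9, pvN9)]) from rfl]
          exact pv_case [(pvP1, pvN1), (pvP2, pvN2), (pvP3, pvN3), (pvP4, pvN4)] [(pvP6, pvN6), (pvP7, pvN7), (pvP8, pvN8), (pvP9, pvN9)] pvP5 pvN5 u (by decide) (by decide) (by decide)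
        have hB : pvScan (c :: t) = pvN5 ++ pvScan u := by
          rw [pvScan, if_neg h1, if_neg h2, if_neg h3, if_neg h4, if_pos hk']
          rw [← hu, List.drop_left]
        rw [hA, hB, ih u hul]
      by_cases h6 : pvP6 <+: c :: t
      · obtain ⟨u, hu⟩ := h6
        have hul : u.length ≤ n := by
          have hlu := congrArg List.length hu
          simp [pvP6] at hlu
          simp only [List.length_cons] at hln
          omega
        have hk' : pvP6 <+: c :: t := ⟨u, hu⟩
        have hA : pvRunC pvRULESC (c :: t) = pvN6 ++ pvRunC pvRULESC u := by
          rw [← hu, show pvRULESC = [(pvP1, pvN1), (pvP2, pvN2), (pvP3, pvN3), (pvP4, pvN4), (pvP5, pvN5)] ++ ((pvP6, pvN6) :: [(pvP7, pvN7), (pvP8, pvN8), (pvP9, pvN9)]) from rfl]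
          exact pv_case [(pvP1, pvN1), (pvP2, pvN2), (pvP3, pvN3), (pvP4, pvN4), (pvP5, pvN5)] [(pvP7, pvN7), (pvP8, pvN8), (pvP9, pvN9)] pvP6 pvN6 u (by decide) (by decide) (by decide)
        have hB : pvScan (c :: t) = pvN6 ++ pvScan u := by
          rw [pvScan, if_neg h1, if_neg h2, if_neg h3, if_neg h4, if_neg h5, if_pos hk']
          rw [← hu, List.drop_left]
        rw [hA, hB, ih u hul]
      by_cases h7 : pvP7 <+: c :: t
      · obtain ⟨u, hu⟩ := h7
        have hul : u.length ≤ n := by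
          have hlu := congrArg List.length hu
          simp [pvP7] at hlu
          simp only [List.length_cons] at hln
          omega
        have hk' : pvP7 <+: c :: t := ⟨u, hu⟩
        have hA : pvRunC pvRULESC (c :: t) = pvN7 ++ pvRunC pvRULESC u := by
          rw [← hu, show pvRULESC = [(pvP1, pvN1), (pvP2, pvN2), (pvP3, pvN3), (pvP4, pvN4), (pvP5, pvN5), (pvP6, pvN6)] ++ ((pvP7, pvN7) :: [(pvP8, pvN8), (pvP9, pvN9)]) from rfl]
          exact pv_case [(pvP1, pvN1), (pvP2, pvN2), (pvP3, pvN3), (pvP4, pvN4), (pvP5, pvN5), (pvP6, pvN6)] [(pvP8, pvN8), (pvP9, pvN9)] pvP7 pvN7 u (by decide) (by decide) (by decide)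
        have hB : pvScan (c :: t) = pvN7 ++ pvScan u := by
          rw [pvScan, if_neg h1, if_neg h2, if_neg h3, if_neg h4, if_neg h5, if_neg h6, if_pos hk']
          rw [← hu, List.drop_left]
        rw [hA, hB, ih u hul]
      by_cases h8 : pvP8 <+: c :: t
      · obtain ⟨u, hu⟩ := h8
        have hul : u.length ≤ n := by
          have hlu := congrArg List.length hu
          simp [pvP8] at hlu
          simp only [List.length_cons] at hln
          omega
        have hk' : pvP8 <+: c :: t := ⟨u, hu⟩
        have hA : pvRunC pvRULESC (c :: t) = pvN8 ++ pvRunC pvRULESC u := by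
          rw [← hu, show pvRULESC = [(pvP1, pvN1), (pvP2, pvN2), (pvP3, pvN3), (pvP4, pvN4), (pvP5, pvN5), (pvP6, pvN6), (pvP7, pvN7)] ++ ((pvP8, pvN8) :: [(pvP9, pvN9)]) from rfl]
          exact pv_case [(pvP1, pvN1), (pvP2, pvN2), (pvP3, pvN3), (pvP4, pvN4), (pvP5, pvN5), (pvP6, pvN6), (pvP7, pvN7)] [(pvP9, pvN9)] pvP8 pvN8 u (by decide) (by decide) (by decide)
        have hB : pvScan (c :: t) = pvN8 ++ pvScan u := by
          rw [pvScan, if_neg h1, if_neg h2, if_neg h3, if_neg h4, if_neg h5, if_neg h6, if_neg h7, if_pos hk']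
          rw [← hu, List.drop_left]
        rw [hA, hB, ih u hul]
      by_cases h9 : pvP9 <+: c :: t
      · obtain ⟨u, hu⟩ := h9
        have hul : u.length ≤ n := by
          have hlu := congrArg List.length hu
          simp [pvP9] at hlu
          simp only [List.length_cons] at hln
          omega
        have hk' : pvP9 <+: c :: t := ⟨u, hu⟩
        have h7' : ∀ j, j < pvP9.length → ¬ pvP7 <+: (pvP9.drop j ++ pvRunC [(pvP1, pvN1), (pvP2, pvN2), (pvP3, pvN3), (pvP4, pvN4), (pvP5, pvN5), (pvP6, pvN6)] u) := by
          intro j hj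
          rw [show pvP9.length = 7 from rfl] at hj
          interval_cases j
          · intro hp
            have hp' : pvP9 ++ ['s'] <+: pvP9 ++ pvRunC [(pvP1, pvN1), (pvP2, pvN2), (pvP3, pvN3), (pvP4, pvN4), (pvP5, pvN5), (pvP6, pvN6)] u := hp
            have hsu : ['s'] <+: u := pvRunC_pres [(pvP1, pvN1), (pvP2, pvN2), (pvP3, pvN3), (pvP4, pvN4), (pvP5, pvN5), (pvP6, pvN6)] u ['s'] (by decide) (pv_strip pvP9 _ _ hp')
            exact h7 (by rw [← hu]; exact pv_graft pvP9 _ _ hsu)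
          · exact pv_head_mismatch _ _ _ _ _ (by decide)
          · exact pv_head_mismatch _ _ _ _ _ (by decide)
          · exact pv_head_mismatch _ _ _ _ _ (by decide)
          · exact pv_head_mismatch _ _ _ _ _ (by decide)
          · exact pv_head_mismatch _ _ _ _ _ (by decide)
          · exact pv_head_mismatch _ _ _ _ _ (by decide)
        have h8' : ∀ j, j < pvP9.length → ¬ pvP8 <+: (pvP9.drop j ++ PySem.Chars.replace (pvRunC [(pvP1, pvN1), (pvP2, pvN2), (pvP3, pvN3), (pvP4, pvN4), (pvP5, pvN5), (pvP6, pvN6)] u) pvP7 pvN7) := by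
          intro j hj
          rw [show pvP9.length = 7 from rfl] at hj
          interval_cases j
          · intro hp
            have hp' : pvP9 ++ [' ', 'T', 'o', 'n', 'n', 'e', 's'] <+: pvP9 ++ PySem.Chars.replace (pvRunC [(pvP1, pvN1), (pvP2, pvN2), (pvP3, pvN3), (pvP4, pvN4), (pvP5, pvN5), (pvP6, pvN6)] u) pvP7 pvN7 := hp
            have hp2 := pv_prefix_replace pvP7 pvN7 (by decide) (by decide) _ _ (by simp [pvN7]) (pv_strip pvP9 _ _ hp')
            have hsu := pvRunC_pres [(pvP1, pvN1), (pvP2, pvN2), (pvP3, pvN3), (pvP4, pvN4), (pvP5, pvN5), (pvP6, pvN6)] u [' ', 'T', 'o', 'n', 'n', 'e', 's'] (by decide) hp2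
            exact h8 (by rw [← hu]; exact pv_graft pvP9 _ _ hsu)
          · exact pv_head_mismatch _ _ _ _ _ (by decide)
          · exact pv_head_mismatch _ _ _ _ _ (by decide)
          · exact pv_head_mismatch _ _ _ _ _ (by decide)
          · exact pv_head_mismatch _ _ _ _ _ (by decide)
          · exact pv_head_mismatch _ _ _ _ _ (by decide)
          · exact pv_head_mismatch _ _ _ _ _ (by decide)
        have hA : pvRunC pvRULESC (c :: t) = pvN9 ++ pvRunC pvRULESC u := by
          rw [← hu]
          calc pvRunC pvRULESC (pvP9 ++ u)
              = pvRunC ((pvP8, pvN8) :: [(pvP9, pvN9)]) (PySem.Chars.replace (pvP9 ++ pvRunC [(pvP1, pvN1), (pvP2, pvN2), (pvP3, pvN3), (pvP4, pvN4), (pvP5, pvN5), (pvP6, pvN6)] u) pvP7 pvN7) := by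
                rw [show pvRULESC = [(pvP1, pvN1), (pvP2, pvN2), (pvP3, pvN3), (pvP4, pvN4), (pvP5, pvN5), (pvP6, pvN6)] ++ ((pvP7, pvN7) :: (pvP8, pvN8) :: [(pvP9, pvN9)]) from rfl, pvRunC_append, pvRunC_front [(pvP1, pvN1), (pvP2, pvN2), (pvP3, pvN3), (pvP4, pvN4), (pvP5, pvN5), (pvP6, pvN6)] pvP9 u (by decide), pvRunC_cons_rules']
            _ = pvRunC [(pvP9, pvN9)] (PySem.Chars.replace (pvP9 ++ PySem.Chars.replace (pvRunC [(pvP1, pvN1), (pvP2, pvN2), (pvP3, pvN3), (pvP4, pvN4), (pvP5, pvN5), (pvP6, pvN6)] u) pvP7 pvN7) pvP8 pvN8) := by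
                rw [pv_replace_front pvP7 pvN7 (by decide) pvP9 _ h7', pvRunC_cons_rules']
            _ = pvRunC [] (PySem.Chars.replace (pvP9 ++ PySem.Chars.replace (PySem.Chars.replace (pvRunC [(pvP1, pvN1), (pvP2, pvN2), (pvP3, pvN3), (pvP4, pvN4), (pvP5, pvN5), (pvP6, pvN6)] u) pvP7 pvN7) pvP8 pvN8) pvP9 pvN9) := by
                rw [pv_replace_front pvP8 pvN8 (by decide) pvP9 _ h8', pvRunC_cons_rules']
            _ = pvN9 ++ PySem.Chars.replace (PySem.Chars.replace (PySem.Chars.replace (pvRunC [(pvP1, pvN1), (pvP2, pvN2), (pvP3, pvN3), (pvP4, pvN4), (pvP5, pvN5), (pvP6, pvN6)] u) pvP7 pvN7) pvP8 pvN8) pvP9 pvN9 := by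
                rw [pv_replace_prefix pvP9 pvN9 _ (by decide)]
                rfl
            _ = pvN9 ++ pvRunC pvRULESC u := by
                conv_rhs => rw [show pvRULESC = [(pvP1, pvN1), (pvP2, pvN2), (pvP3, pvN3), (pvP4, pvN4), (pvP5, pvN5), (pvP6, pvN6)] ++ ((pvP7, pvN7) :: (pvP8, pvN8) :: [(pvP9, pvN9)]) from rfl, pvRunC_append, pvRunC_cons_rules', pvRunC_cons_rules', pvRunC_cons_rules', pvRunC_nil_rules]
        have hB : pvScan (c :: t) = pvN9 ++ pvScan u := by
          rw [pvScan, if_neg h1, if_neg h2, if_neg h3, if_neg h4, if_neg h5, if_neg h6, if_neg h7, if_neg h8, if_pos hk']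
          rw [← hu, List.drop_left]
        rw [hA, hB, ih u hul]
      have htl : t.length ≤ n := by simp only [List.length_cons] at hln; omega
      have hA : pvRunC pvRULESC (c :: t) = c :: pvRunC pvRULESC t := by
        have h2' := pv_not_prefix_cons_run pvP2 [(pvP1, pvN1)] c t (by decide) (by decide) h2
        rw [show pvRunC [(pvP1, pvN1)] t = PySem.Chars.replace (t) pvP1 pvN1 from by conv_lhs => rw [pvRunC_cons_rules', pvRunC_nil_rules]] at h2'
        have h3' := pv_not_prefix_cons_run pvP3 [(pvP1, pvN1), (pvP2, pvN2)] c t (by decide) (by decide) h3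
        rw [show pvRunC [(pvP1, pvN1), (pvP2, pvN2)] t = PySem.Chars.replace (PySem.Chars.replace (t) pvP1 pvN1) pvP2 pvN2 from by conv_lhs => rw [pvRunC_cons_rules', pvRunC_cons_rules', pvRunC_nil_rules]] at h3'
        have h4' := pv_not_prefix_cons_run pvP4 [(pvP1, pvN1), (pvP2, pvN2), (pvP3, pvN3)] c t (by decide) (by decide) h4
        rw [show pvRunC [(pvP1, pvN1), (pvP2, pvN2), (pvP3, pvN3)] t = PySem.Chars.replace (PySem.Chars.replace (PySem.Chars.replace (t) pvP1 pvN1) pvP2 pvN2) pvP3 pvN3 from by conv_lhs => rw [pvRunC_cons_rules', pvRunC_cons_rules', pvRunC_cons_rules', pvRunC_nil_rules]] at h4'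
        have h5' := pv_not_prefix_cons_run pvP5 [(pvP1, pvN1), (pvP2, pvN2), (pvP3, pvN3), (pvP4, pvN4)] c t (by decide) (by decide) h5
        rw [show pvRunC [(pvP1, pvN1), (pvP2, pvN2), (pvP3, pvN3), (pvP4, pvN4)] t = PySem.Chars.replace (PySem.Chars.replace (PySem.Chars.replace (PySem.Chars.replace (t) pvP1 pvN1) pvP2 pvN2) pvP3 pvN3) pvP4 pvN4 from by conv_lhs => rw [pvRunC_cons_rules', pvRunC_cons_rules', pvRunC_cons_rules', pvRunC_cons_rules', pvRunC_nil_rules]] at h5'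
        have h6' := pv_not_prefix_cons_run pvP6 [(pvP1, pvN1), (pvP2, pvN2), (pvP3, pvN3), (pvP4, pvN4), (pvP5, pvN5)] c t (by decide) (by decide) h6
        rw [show pvRunC [(pvP1, pvN1), (pvP2, pvN2), (pvP3, pvN3), (pvP4, pvN4), (pvP5, pvN5)] t = PySem.Chars.replace (PySem.Chars.replace (PySem.Chars.replace (PySem.Chars.replace (PySem.Chars.replace (t) pvP1 pvN1) pvP2 pvN2) pvP3 pvN3) pvP4 pvN4) pvP5 pvN5 from by conv_lhs => rw [pvRunC_cons_rules', pvRunC_cons_rules', pvRunC_cons_rules', pvRunC_cons_rules', pvRunC_cons_rules', pvRunC_nil_rules]] at h6'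
        have h7' := pv_not_prefix_cons_run pvP7 [(pvP1, pvN1), (pvP2, pvN2), (pvP3, pvN3), (pvP4, pvN4), (pvP5, pvN5), (pvP6, pvN6)] c t (by decide) (by decide) h7
        rw [show pvRunC [(pvP1, pvN1), (pvP2, pvN2), (pvP3, pvN3), (pvP4, pvN4), (pvP5, pvN5), (pvP6, pvN6)] t = PySem.Chars.replace (PySem.Chars.replace (PySem.Chars.replace (PySem.Chars.replace (PySem.Chars.replace (PySem.Chars.replace (t) pvP1 pvN1) pvP2 pvN2) pvP3 pvN3) pvP4 pvN4) pvP5 pvN5) pvP6 pvN6 from by conv_lhs => rw [pvRunC_cons_rules', pvRunC_cons_rules', pvRunC_cons_rules', pvRunC_cons_rules', pvRunC_cons_rules', pvRunC_cons_rules', pvRunC_nil_rules]] at h7'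
        have h8' := pv_not_prefix_cons_run pvP8 [(pvP1, pvN1), (pvP2, pvN2), (pvP3, pvN3), (pvP4, pvN4), (pvP5, pvN5), (pvP6, pvN6), (pvP7, pvN7)] c t (by decide) (by decide) h8
        rw [show pvRunC [(pvP1, pvN1), (pvP2, pvN2), (pvP3, pvN3), (pvP4, pvN4), (pvP5, pvN5), (pvP6, pvN6), (pvP7, pvN7)] t = PySem.Chars.replace (PySem.Chars.replace (PySem.Chars.replace (PySem.Chars.replace (PySem.Chars.replace (PySem.Chars.replace (PySem.Chars.replace (t) pvP1 pvN1) pvP2 pvN2) pvP3 pvN3) pvP4 pvN4) pvP5 pvN5) pvP6 pvN6) pvP7 pvN7 from by conv_lhs => rw [pvRunC_cons_rules', pvRunC_cons_rules', pvRunC_cons_rules', pvRunC_cons_rules', pvRunC_cons_rules', pvRunC_cons_rules', pvRunC_cons_rules', pvRunC_nil_rules]] at h8'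
        have h9' := pv_not_prefix_cons_run pvP9 [(pvP1, pvN1), (pvP2, pvN2), (pvP3, pvN3), (pvP4, pvN4), (pvP5, pvN5), (pvP6, pvN6), (pvP7, pvN7), (pvP8, pvN8)] c t (by decide) (by decide) h9
        rw [show pvRunC [(pvP1, pvN1), (pvP2, pvN2), (pvP3, pvN3), (pvP4, pvN4), (pvP5, pvN5), (pvP6, pvN6), (pvP7, pvN7), (pvP8, pvN8)] t = PySem.Chars.replace (PySem.Chars.replace (PySem.Chars.replace (PySem.Chars.replace (PySem.Chars.replace (PySem.Chars.replace (PySem.Chars.replace (PySem.Chars.replace (t) pvP1 pvN1) pvP2 pvN2) pvP3 pvN3) pvP4 pvN4) pvP5 pvN5) pvP6 pvN6) pvP7 pvN7) pvP8 pvN8 from by conv_lhs => rw [pvRunC_cons_rules', pvRunC_cons_rules', pvRunC_cons_rules', pvRunC_cons_rules', pvRunC_cons_rules', pvRunC_cons_rules', pvRunC_cons_rules', pvRunC_cons_rules', pvRunC_nil_rules]] at h9'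
        calc pvRunC pvRULESC (c :: t)
            = pvRunC [(pvP2, pvN2), (pvP3, pvN3), (pvP4, pvN4), (pvP5, pvN5), (pvP6, pvN6), (pvP7, pvN7), (pvP8, pvN8), (pvP9, pvN9)] (c :: PySem.Chars.replace (t) pvP1 pvN1) := by
              rw [show pvRULESC = [(pvP1, pvN1), (pvP2, pvN2), (pvP3, pvN3), (pvP4, pvN4), (pvP5, pvN5), (pvP6, pvN6), (pvP7, pvN7), (pvP8, pvN8), (pvP9, pvN9)] from rfl, pvRunC_cons_rules', pv_replace_cons pvP1 pvN1 c t (by decide) h1]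
          _ = pvRunC [(pvP3, pvN3), (pvP4, pvN4), (pvP5, pvN5), (pvP6, pvN6), (pvP7, pvN7), (pvP8, pvN8), (pvP9, pvN9)] (c :: PySem.Chars.replace (PySem.Chars.replace (t) pvP1 pvN1) pvP2 pvN2) := by
              rw [pvRunC_cons_rules', pv_replace_cons pvP2 pvN2 c (PySem.Chars.replace (t) pvP1 pvN1) (by decide) h2']
          _ = pvRunC [(pvP4, pvN4), (pvP5, pvN5), (pvP6, pvN6), (pvP7, pvN7), (pvP8, pvN8), (pvP9, pvN9)] (c :: PySem.Chars.replace (PySem.Chars.replace (PySem.Chars.replace (t) pvP1 pvN1) pvP2 pvN2) pvP3 pvN3) := by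
              rw [pvRunC_cons_rules', pv_replace_cons pvP3 pvN3 c (PySem.Chars.replace (PySem.Chars.replace (t) pvP1 pvN1) pvP2 pvN2) (by decide) h3']
          _ = pvRunC [(pvP5, pvN5), (pvP6, pvN6), (pvP7, pvN7), (pvP8, pvN8), (pvP9, pvN9)] (c :: PySem.Chars.replace (PySem.Chars.replace (PySem.Chars.replace (PySem.Chars.replace (t) pvP1 pvN1) pvP2 pvN2) pvP3 pvN3) pvP4 pvN4) := by
              rw [pvRunC_cons_rules', pv_replace_cons pvP4 pvN4 c (PySem.Chars.replace (PySem.Chars.replace (PySem.Chars.replace (t) pvP1 pvN1) pvP2 pvN2) pvP3 pvN3) (by decide) h4']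
          _ = pvRunC [(pvP6, pvN6), (pvP7, pvN7), (pvP8, pvN8), (pvP9, pvN9)] (c :: PySem.Chars.replace (PySem.Chars.replace (PySem.Chars.replace (PySem.Chars.replace (PySem.Chars.replace (t) pvP1 pvN1) pvP2 pvN2) pvP3 pvN3) pvP4 pvN4) pvP5 pvN5) := by
              rw [pvRunC_cons_rules', pv_replace_cons pvP5 pvN5 c (PySem.Chars.replace (PySem.Chars.replace (PySem.Chars.replace (PySem.Chars.replace (t) pvP1 pvN1) pvP2 pvN2) pvP3 pvN3) pvP4 pvN4) (by decide) h5']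
          _ = pvRunC [(pvP7, pvN7), (pvP8, pvN8), (pvP9, pvN9)] (c :: PySem.Chars.replace (PySem.Chars.replace (PySem.Chars.replace (PySem.Chars.replace (PySem.Chars.replace (PySem.Chars.replace (t) pvP1 pvN1) pvP2 pvN2) pvP3 pvN3) pvP4 pvN4) pvP5 pvN5) pvP6 pvN6) := by
              rw [pvRunC_cons_rules', pv_replace_cons pvP6 pvN6 c (PySem.Chars.replace (PySem.Chars.replace (PySem.Chars.replace (PySem.Chars.replace (PySem.Chars.replace (t) pvP1 pvN1) pvP2 pvN2) pvP3 pvN3) pvP4 pvN4) pvP5 pvN5) (by decide) h6']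
          _ = pvRunC [(pvP8, pvN8), (pvP9, pvN9)] (c :: PySem.Chars.replace (PySem.Chars.replace (PySem.Chars.replace (PySem.Chars.replace (PySem.Chars.replace (PySem.Chars.replace (PySem.Chars.replace (t) pvP1 pvN1) pvP2 pvN2) pvP3 pvN3) pvP4 pvN4) pvP5 pvN5) pvP6 pvN6) pvP7 pvN7) := by
              rw [pvRunC_cons_rules', pv_replace_cons pvP7 pvN7 c (PySem.Chars.replace (PySem.Chars.replace (PySem.Chars.replace (PySem.Chars.replace (PySem.Chars.replace (PySem.Chars.replace (t) pvP1 pvN1) pvP2 pvN2) pvP3 pvN3) pvP4 pvN4) pvP5 pvN5) pvP6 pvN6) (by decide) h7']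
          _ = pvRunC [(pvP9, pvN9)] (c :: PySem.Chars.replace (PySem.Chars.replace (PySem.Chars.replace (PySem.Chars.replace (PySem.Chars.replace (PySem.Chars.replace (PySem.Chars.replace (PySem.Chars.replace (t) pvP1 pvN1) pvP2 pvN2) pvP3 pvN3) pvP4 pvN4) pvP5 pvN5) pvP6 pvN6) pvP7 pvN7) pvP8 pvN8) := by
              rw [pvRunC_cons_rules', pv_replace_cons pvP8 pvN8 c (PySem.Chars.replace (PySem.Chars.replace (PySem.Chars.replace (PySem.Chars.replace (PySem.Chars.replace (PySem.Chars.replace (PySem.Chars.replace (t) pvP1 pvN1) pvP2 pvN2) pvP3 pvN3) pvP4 pvN4) pvP5 pvN5) pvP6 pvN6) pvP7 pvN7) (by decide) h8']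
          _ = pvRunC [] (c :: PySem.Chars.replace (PySem.Chars.replace (PySem.Chars.replace (PySem.Chars.replace (PySem.Chars.replace (PySem.Chars.replace (PySem.Chars.replace (PySem.Chars.replace (PySem.Chars.replace (t) pvP1 pvN1) pvP2 pvN2) pvP3 pvN3) pvP4 pvN4) pvP5 pvN5) pvP6 pvN6) pvP7 pvN7) pvP8 pvN8) pvP9 pvN9) := by
              rw [pvRunC_cons_rules', pv_replace_cons pvP9 pvN9 c (PySem.Chars.replace (PySem.Chars.replace (PySem.Chars.replace (PySem.Chars.replace (PySem.Chars.replace (PySem.Chars.replace (PySem.Chars.replace (PySem.Chars.replace (t) pvP1 pvN1) pvP2 pvN2) pvP3 pvN3) pvP4 pvN4) pvP5 pvN5) pvP6 pvN6) pvP7 pvN7) pvP8 pvN8) (by decide) h9']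
          _ = c :: pvRunC pvRULESC t := by
              rw [pvRunC_nil_rules]
              conv_rhs => rw [show pvRULESC = [(pvP1, pvN1), (pvP2, pvN2), (pvP3, pvN3), (pvP4, pvN4), (pvP5, pvN5), (pvP6, pvN6), (pvP7, pvN7), (pvP8, pvN8), (pvP9, pvN9)] from rfl, pvRunC_cons_rules', pvRunC_cons_rules', pvRunC_cons_rules', pvRunC_cons_rules', pvRunC_cons_rules', pvRunC_cons_rules', pvRunC_cons_rules', pvRunC_cons_rules', pvRunC_cons_rules', pvRunC_nil_rules]
      have hB : pvScan (c :: t) = c :: pvScan t := by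
        rw [pvScan, if_neg h1, if_neg h2, if_neg h3, if_neg h4, if_neg h5, if_neg h6, if_neg h7, if_neg h8, if_neg h9]
      rw [hA, hB, ih t htl]

theorem pv_main (l : List Char) : pvRunC pvRULESC l = pvScan l :=
  pv_mainN l.length l le_rfl


-- ===== VERDICT (by name: the statement is the Claim_ definition above) =====
theorem standardize_units_spec : Claim_equal_standardize_units := by
  intro label _
  unfold Spec_standardize_units
  apply String.toList_inj.mp
  rw [pv_bridgeA, pv_main]
  simp [standardize_units_alt]
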